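-- pv_equiv track=rewrite | github.com/jake04/RunAndBunGuided | macos-app/src/script_import_dialog.py | _parse_text_format
-- ===== SOURCE A (Python) =====
-- def _parse_text_format(text):
--     """
--     Parse line-by-line text format.
--     Expected format:
--         Pokemon: Pikachu
--         Level: 50
--         Move1: Thunderbolt
--         Move2: Quick Attack
--         ...
--     """
--     data = {}
--     lines = text.split('\n')
--     current_pokemon = None
--     pokemon_list = []
--
--     for line in lines:
--         line = line.strip()
--         if not line:
--             continue
--
--         if ':' not in line:
--             continue
--
--         key, value = line.split(':', 1)
--         key = key.strip().lower()
--         value = value.strip()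
--
--         # Start of a new Pokémon
--         if key == 'pokemon':
--             if current_pokemon:
--                 pokemon_list.append(current_pokemon)
--             current_pokemon = {'species': value}
--
--         elif key in ['level', 'hp', 'attack', 'defense', 'spattack', 'spdefense', 'speed']:
--             if current_pokemon:
--                 try:
--                     current_pokemon[key] = int(value)
--                 except ValueError:
--                     current_pokemon[key] = value
--
--         elif key.startswith('move'):
--             if current_pokemon:
--                 if 'moves' not in current_pokemon:
--                     current_pokemon['moves'] = []
--                 current_pokemon['moves'].append(value)
--
--         elif key in ['ability', 'nature', 'item']:
--             if current_pokemon: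
--                 current_pokemon[key] = value
--
--     # Add the last Pokémon
--     if current_pokemon:
--         pokemon_list.append(current_pokemon)
--
--     data['team'] = pokemon_list
--     return data
-- ===== SOURCE B (Python) =====
-- _STAT_KEYS = ('level', 'hp', 'attack', 'defense', 'spattack', 'spdefense', 'speed')
--
--
-- def _to_pair(line):
--     """Strip a line and split it into a (lowercased key, value) pair on the
--     first ':'; None for blank lines and lines without a colon."""
--     line = line.strip()
--     if not line or ':' not in line:
--         return None
--     key, value = line.split(':', 1)
--     return key.strip().lower(), value.strip()
--
--
-- def _make_mon(species, kvs):
--     """Build one pokemon dict from its species and the (key, value) pairs of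
--     its block."""
--     mon = {'species': species}
--     for key, value in kvs:
--         if key in _STAT_KEYS:
--             try:
--                 mon[key] = int(value)
--             except ValueError:
--                 mon[key] = value
--         elif key.startswith('move'):
--             mon.setdefault('moves', []).append(value)
--         elif key in ('ability', 'nature', 'item'):
--             mon[key] = value
--     return mon
--
--
-- def _parse_text_format(text):
--     # phase 1: lines -> (key, value) pairs
--     pairs = [p for p in map(_to_pair, text.split('\n')) if p is not None]
--     # phase 2: group the pairs into blocks, one per 'pokemon' key; pairs
--     # before the first block are dropped
--     blocks = []
--     for key, value in pairs:
--         if key == 'pokemon':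
--             blocks.append((value, []))
--         elif blocks:
--             blocks[-1][1].append((key, value))
--     # phase 3: one dict per block
--     return {'team': [_make_mon(s, kvs) for s, kvs in blocks]}
-- ===== Notes on version B (the rewrite author's own statement) =====
-- stated objective: alternative
-- what changed: A threads an Optional current-pokemon dict through one stateful line loop; B first maps lines to (key,value) pairs, then groups the pairs into per-pokemon blocks, then builds each dict from its block in a separate pass.
import Mathlib
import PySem

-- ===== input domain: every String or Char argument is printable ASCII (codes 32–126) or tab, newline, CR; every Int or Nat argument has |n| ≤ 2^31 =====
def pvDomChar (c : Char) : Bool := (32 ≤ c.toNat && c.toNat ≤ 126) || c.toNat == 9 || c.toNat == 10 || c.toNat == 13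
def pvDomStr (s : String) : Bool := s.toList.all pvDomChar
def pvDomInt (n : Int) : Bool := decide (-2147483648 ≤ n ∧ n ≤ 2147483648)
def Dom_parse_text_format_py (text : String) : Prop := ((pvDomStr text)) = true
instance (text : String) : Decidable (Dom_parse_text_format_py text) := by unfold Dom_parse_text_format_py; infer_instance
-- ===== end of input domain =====

-- B replaces A's single stateful line loop (Optional current dict) by three passes: lines → (key,value)
-- pairs, pairs → per-pokemon blocks, block → dict; same O(n) cost, different decomposition ('alternative').
-- Representation note (both ports, the same encoding): Python stores int(value) for stat keys and a list
-- for 'moves', which fall outside the declared String value type; both ports encode the int as its decimal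
-- string str(n) and the moves list as its '\n'-join (values never contain '\n', so the join is faithful);
-- where A's stored values are themselves strings the ports are exact.

-- ===== PORT A =====
def parse_text_format_py_step
    (st : Option (PySem.Dict String String) × List (PySem.Dict String String))
    (rawLine : String) : Option (PySem.Dict String String) × List (PySem.Dict String String) :=
  let line := PySem.Str.strip rawLine
  if line == "" then st
  else if !(PySem.Str.isIn ":" line) then st
  else
    match PySem.Str.splitMax? line ":" 1 with
    | some [k, v] =>
      let key := PySem.Str.lower (PySem.Str.strip k)
      let value := PySem.Str.strip v
      if key == "pokemon" then
        -- append current_pokemon (never the empty dict, so truthiness = is-not-None), start a new one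
        (some (PySem.Dict.insert PySem.Dict.empty "species" value),
         match st.1 with
         | some cur => st.2 ++ [cur]
         | none => st.2)
      else
        match st.1 with
        | none => st
        | some cur =>
          if ["level", "hp", "attack", "defense", "spattack", "spdefense", "speed"].contains key then
            (some (cur.insert key (match PySem.Int.ofStr? value with
              | some n => PySem.Int.toStr n   -- int(value) succeeded: stored encoded as str(n)
              | none => value)), st.2)        -- ValueError: the raw string
          else if PySem.Str.startswith key "move" then
            (some (match cur.get? "moves" with
              | none => cur.insert "moves" value                      -- 'moves' = [] then append(value)
              | some ms => cur.insert "moves" (ms ++ "\n" ++ value)), st.2)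
          else if key == "ability" || key == "nature" || key == "item" then
            (some (cur.insert key value), st.2)
          else st
    | _ => st   -- unreachable: ':' is in line, so split(':', 1) yields exactly two pieces

def parse_text_format_py (text : String) : List (String × List (List (String × String))) :=
  -- split? is some: the separator "\n" is nonempty
  let fin := ((PySem.Str.split? text "\n").getD []).foldl parse_text_format_py_step (none, [])
  let pokemonList :=
    match fin.1 with     -- add the last pokemon
    | some cur => fin.2 ++ [cur]
    | none => fin.2
  [("team", pokemonList.map PySem.Dict.items)]

-- ===== PORT B =====
def pvToPairB (line : String) : Option (String × String) :=
  let l := PySem.Str.strip line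
  if l == "" then none
  else if !(PySem.Str.isIn ":" l) then none
  else
    match PySem.Str.splitMax? l ":" 1 with
    | some [k, v] => some (PySem.Str.lower (PySem.Str.strip k), PySem.Str.strip v)
    | _ => none

def pvGroupStep (blocks : List (String × List (String × String))) (p : String × String) :
    List (String × List (String × String)) :=
  if p.1 == "pokemon" then blocks ++ [(p.2, [])]
  else
    match blocks.getLast? with
    | none => blocks
    | some b => blocks.dropLast ++ [(b.1, b.2 ++ [p])]

def pvDispatchB (mon : PySem.Dict String String) (p : String × String) : PySem.Dict String String :=
  if ["level", "hp", "attack", "defense", "spattack", "spdefense", "speed"].contains p.1 then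
    mon.insert p.1 (match PySem.Int.ofStr? p.2 with
      | some n => PySem.Int.toStr n     -- int(value) succeeded: stored encoded as str(n)
      | none => p.2)
  else if PySem.Str.startswith p.1 "move" then
    (match mon.get? "moves" with        -- setdefault('moves', []).append(value)
     | none => mon.insert "moves" p.2
     | some ms => mon.insert "moves" (ms ++ "\n" ++ p.2))
  else if p.1 == "ability" || p.1 == "nature" || p.1 == "item" then
    mon.insert p.1 p.2
  else mon

def pvMakeMon (b : String × List (String × String)) : PySem.Dict String String :=
  b.2.foldl pvDispatchB (PySem.Dict.insert PySem.Dict.empty "species" b.1)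

def parse_text_format_py_alt (text : String) : List (String × List (List (String × String))) :=
  let pairs := ((PySem.Str.split? text "\n").getD []).filterMap pvToPairB
  let blocks := pairs.foldl pvGroupStep []
  [("team", (blocks.map pvMakeMon).map PySem.Dict.items)]

-- ===== PRECONDITION & SPEC =====
def Spec_parse_text_format_py (text : String) (out : List (String × List (List (String × String)))) : Prop := out = parse_text_format_py_alt text
instance (text : String) (out : List (String × List (List (String × String)))) : Decidable (Spec_parse_text_format_py text out) := by unfold Spec_parse_text_format_py; infer_instance

-- ===== CLAIM (what is proved, stated in full; the proofs are below) =====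
def Claim_equal_parse_text_format_py : Prop := ∀ (text : String), Dom_parse_text_format_py text → Spec_parse_text_format_py text (parse_text_format_py text)

-- ===== LEMMAS AND PROOFS =====

-- A's finalisation: append the pending pokemon, if any.
def pvFinal (st : Option (PySem.Dict String String) × List (PySem.Dict String String)) :
    List (PySem.Dict String String) :=
  match st.1 with
  | some cur => st.2 ++ [cur]
  | none => st.2

-- A's per-line step, reorganised per parsed pair (proof-side only).
def pvPairStepA (st : Option (PySem.Dict String String) × List (PySem.Dict String String))
    (p : String × String) : Option (PySem.Dict String String) × List (PySem.Dict String String) :=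
  if p.1 == "pokemon" then (some (PySem.Dict.insert PySem.Dict.empty "species" p.2), pvFinal st)
  else
    match st.1 with
    | none => st
    | some cur => (some (pvDispatchB cur p), st.2)

set_option maxHeartbeats 1000000 in
theorem pvStep_eq (st : Option (PySem.Dict String String) × List (PySem.Dict String String))
    (line : String) :
    parse_text_format_py_step st line =
      match pvToPairB line with
      | none => st
      | some p => pvPairStepA st p := by
  obtain ⟨c, l⟩ := st
  simp only [parse_text_format_py_step, pvToPairB]
  by_cases h1 : (PySem.Str.strip line == "") = true
  · rw [if_pos h1, if_pos h1]
  · rw [if_neg h1, if_neg h1]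
    cases h2 : PySem.Str.isIn ":" (PySem.Str.strip line) with
    | true =>
      rw [if_neg (by decide), if_neg (by decide)]
      cases hs : PySem.Str.splitMax? (PySem.Str.strip line) ":" 1 with
      | none => rfl
      | some parts =>
        match parts with
        | [] => rfl
        | [k] => rfl
        | k :: v :: w :: rest => rfl
        | [k, v] =>
          dsimp only
          by_cases hp : (PySem.Str.lower (PySem.Str.strip k) == "pokemon") = true
          · rw [if_pos hp]
            simp only [pvPairStepA, pvFinal, if_pos hp]
          · rw [if_neg hp]
            simp only [pvPairStepA, pvDispatchB, if_neg hp]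
            cases c with
            | none => rfl
            | some cur => dsimp only; split_ifs <;> rfl
    | false =>
      rw [if_pos (by decide), if_pos (by decide)]

theorem pvFoldLines_eq (lines : List String)
    (st : Option (PySem.Dict String String) × List (PySem.Dict String String)) :
    lines.foldl parse_text_format_py_step st =
      (lines.filterMap pvToPairB).foldl pvPairStepA st := by
  induction lines generalizing st with
  | nil => rfl
  | cons hd t ih =>
    simp only [List.foldl_cons, List.filterMap_cons]
    rw [pvStep_eq]
    cases pvToPairB hd with
    | none => exact ih st
    | some p => simp only [List.foldl_cons]; exact ih _

theorem pvGroupStep_append (bs cs : List (String × List (String × String)))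
    (hcs : cs ≠ []) (p : String × String) :
    pvGroupStep (bs ++ cs) p = bs ++ pvGroupStep cs p := by
  unfold pvGroupStep
  by_cases hp : (p.1 == "pokemon") = true
  · rw [if_pos hp, if_pos hp, List.append_assoc]
  · rw [if_neg hp, if_neg hp, List.getLast?_append]
    cases hl : cs.getLast? with
    | none => exact absurd (List.getLast?_eq_none_iff.mp hl) hcs
    | some b =>
      rw [show (some b).or bs.getLast? = some b from rfl]
      dsimp only
      rw [List.dropLast_append_of_ne_nil hcs, List.append_assoc]

theorem pvGroupStep_ne_nil (cs : List (String × List (String × String)))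
    (hcs : cs ≠ []) (p : String × String) : pvGroupStep cs p ≠ [] := by
  unfold pvGroupStep
  by_cases hp : (p.1 == "pokemon") = true
  · rw [if_pos hp]; simp
  · rw [if_neg hp]
    cases hl : cs.getLast? with
    | none => exact hcs
    | some b => simp

theorem pvGroup_split (ps : List (String × String))
    (bs cs : List (String × List (String × String))) (hcs : cs ≠ []) :
    ps.foldl pvGroupStep (bs ++ cs) = bs ++ ps.foldl pvGroupStep cs := by
  induction ps generalizing cs with
  | nil => rfl
  | cons p t ih =>
    simp only [List.foldl_cons]
    rw [pvGroupStep_append bs cs hcs p]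
    exact ih _ (pvGroupStep_ne_nil cs hcs p)

theorem pvMain_some (ps : List (String × String)) (acc : List (PySem.Dict String String))
    (s : String) (kvs : List (String × String)) :
    pvFinal (ps.foldl pvPairStepA (some (pvMakeMon (s, kvs)), acc)) =
      acc ++ (ps.foldl pvGroupStep [(s, kvs)]).map pvMakeMon := by
  induction ps generalizing acc s kvs with
  | nil => simp [pvFinal]
  | cons p t ih =>
    simp only [List.foldl_cons]
    by_cases hp : (p.1 == "pokemon") = true
    · rw [show pvPairStepA (some (pvMakeMon (s, kvs)), acc) p
            = (some (pvMakeMon (p.2, [])), acc ++ [pvMakeMon (s, kvs)]) by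
          simp [pvPairStepA, hp, pvFinal, pvMakeMon]]
      rw [show pvGroupStep [(s, kvs)] p = [(s, kvs)] ++ [(p.2, [])] by
          unfold pvGroupStep; rw [if_pos hp]]
      rw [pvGroup_split t [(s, kvs)] [(p.2, [])] (by simp)]
      rw [ih]
      simp
    · rw [show pvPairStepA (some (pvMakeMon (s, kvs)), acc) p
            = (some (pvMakeMon (s, kvs ++ [p])), acc) by
          simp [pvPairStepA, hp, pvMakeMon, List.foldl_append]]
      rw [show pvGroupStep [(s, kvs)] p = [(s, kvs ++ [p])] by
          unfold pvGroupStep; rw [if_neg hp]; rfl]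
      exact ih acc s (kvs ++ [p])

theorem pvMain_none (ps : List (String × String)) (acc : List (PySem.Dict String String)) :
    pvFinal (ps.foldl pvPairStepA (none, acc)) =
      acc ++ (ps.foldl pvGroupStep []).map pvMakeMon := by
  induction ps generalizing acc with
  | nil => simp [pvFinal]
  | cons p t ih =>
    simp only [List.foldl_cons]
    by_cases hp : (p.1 == "pokemon") = true
    · rw [show pvPairStepA (none, acc) p = (some (pvMakeMon (p.2, [])), acc) by
          simp [pvPairStepA, hp, pvFinal, pvMakeMon]]
      rw [show pvGroupStep [] p = [(p.2, [])] by unfold pvGroupStep; rw [if_pos hp]; rfl]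
      exact pvMain_some t acc p.2 []
    · rw [show pvPairStepA (none, acc) p = (none, acc) by simp [pvPairStepA, hp]]
      rw [show pvGroupStep [] p = [] by unfold pvGroupStep; rw [if_neg hp]; rfl]
      exact ih acc

-- ===== VERDICT (by name: the statement is the Claim_ definition above) =====
theorem parse_text_format_py_spec : Claim_equal_parse_text_format_py := by
  intro text _
  show parse_text_format_py text = parse_text_format_py_alt text
  unfold parse_text_format_py parse_text_format_py_alt
  dsimp only
  rw [pvFoldLines_eq]
  have h := pvMain_none (((PySem.Str.split? text "\n").getD []).filterMap pvToPairB) []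
  rw [List.nil_append] at h
  rw [← h]
  rfl
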